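-- pv_equiv track=rewrite | github.com/sky1su/cmdb_cli | cmdb.py | convert_fields
-- ===== SOURCE A (Python) =====
-- def convert_field(arg):
--     """Возвращает значение словаря по переданному ключу"""
--     convert_dict = {'cpu': 'vcpu',
--                     'ram': 'ram',
--                     'hdd': 'hdd_size',
--                     'ip': 'ip_address',
--                     'net_mask': 'net_subnet',
--                     'os': 'os',
--                     'network': 'network',
--                     'is_name': 'is_name',
--                     'dc': 'dc'
--                     }
--     return convert_dict[arg]
--
-- def convert_fields(args):
--     result = ['host_name', 'server_id']
--     for item in args:
--         if item == 'network':
--             result.append('ip_address')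
--             result.append('net_subnet')
--         else:
--             if item == 'hdd':
--                 result.append('hdd_number')
--                 result.append('hdd_size')
--             else:
--                 result.append(convert_field(item))
--     return result
-- ===== SOURCE B (Python) =====
-- # Maps field names to DB columns by assembling one space-separated string and splitting it.
-- TABLE = {
--     'network': 'ip_address net_subnet',
--     'hdd': 'hdd_number hdd_size',
--     'cpu': 'vcpu',
--     'ram': 'ram',
--     'ip': 'ip_address',
--     'net_mask': 'net_subnet',
--     'os': 'os',
--     'is_name': 'is_name',
--     'dc': 'dc',
-- }
--
-- def convert_fields(args):
--     words = ['host_name server_id'] + [TABLE[item] for item in args]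
--     return ' '.join(words).split(' ')
-- ===== Notes on version B (the rewrite author's own statement) =====
-- stated objective: alternative
-- what changed: Replaces A's branching loop that appends column names list-by-list with a string pipeline: each field maps to one space-separated column string, all words are joined into a single string and split once on spaces to yield the column list.
import Mathlib
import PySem

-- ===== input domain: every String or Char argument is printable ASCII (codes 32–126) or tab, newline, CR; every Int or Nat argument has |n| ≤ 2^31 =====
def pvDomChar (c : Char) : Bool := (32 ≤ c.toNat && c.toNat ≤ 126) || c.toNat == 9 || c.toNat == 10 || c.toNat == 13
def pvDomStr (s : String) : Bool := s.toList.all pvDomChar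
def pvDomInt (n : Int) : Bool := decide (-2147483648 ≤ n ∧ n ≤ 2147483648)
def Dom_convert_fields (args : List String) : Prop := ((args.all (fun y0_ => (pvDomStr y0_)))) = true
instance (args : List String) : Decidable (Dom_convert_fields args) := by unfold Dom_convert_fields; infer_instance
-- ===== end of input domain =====

-- B maps each field to a space-separated column string, joins everything into one string
-- and splits it once, replacing A's branching loop (objective: alternative decomposition).

-- ===== PORT A =====
-- convert_field: dict lookup; 'none' = Python KeyError, excluded by Pre_ (getD "" is never
-- reached inside Pre_).
def convertFieldDict : PySem.Dict String String :=
  PySem.Dict.ofList [("cpu", "vcpu"), ("ram", "ram"), ("hdd", "hdd_size"),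
    ("ip", "ip_address"), ("net_mask", "net_subnet"), ("os", "os"),
    ("network", "network"), ("is_name", "is_name"), ("dc", "dc")]

def convert_field (arg : String) : String :=
  (convertFieldDict.get? arg).getD ""

def convert_fields (args : List String) : List String :=
  args.foldl (fun result item =>
    if item == "network" then
      result ++ ["ip_address", "net_subnet"]
    else
      if item == "hdd" then
        result ++ ["hdd_number", "hdd_size"]
      else
        result ++ [convert_field item])
    ["host_name", "server_id"]

-- ===== PORT B =====
-- TABLE: field name -> its output columns as one space-separated string;
-- 'none' = Python KeyError, excluded by Pre_ (getD "" never reached inside Pre_).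
def pvTable : PySem.Dict String String :=
  PySem.Dict.ofList [("network", "ip_address net_subnet"), ("hdd", "hdd_number hdd_size"),
    ("cpu", "vcpu"), ("ram", "ram"), ("ip", "ip_address"), ("net_mask", "net_subnet"),
    ("os", "os"), ("is_name", "is_name"), ("dc", "dc")]

-- ' '.join(words).split(' '); the separator " " is nonempty, so Python's split never
-- raises and split? is always 'some' — getD [] is only a totality guard.
def convert_fields_alt (args : List String) : List String :=
  let words := "host_name server_id" :: args.map (fun item => (pvTable.get? item).getD "")
  (PySem.Str.split? (PySem.Str.join " " words) " ").getD []

-- ===== PRECONDITION & SPEC =====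
-- Pre_ excludes args containing a key outside the table, on which both Pythons raise KeyError.
def Pre_convert_fields (args : List String) : Prop :=
  ∀ item ∈ args, item ∈ ["cpu", "ram", "hdd", "ip", "net_mask", "os", "network", "is_name", "dc"]
instance (args : List String) : Decidable (Pre_convert_fields args) := by
  unfold Pre_convert_fields; infer_instance

def pvWitness_convert_fields : List String := ["network", "hdd", "cpu", "dc"]

def Spec_convert_fields (args : List String) (out : List String) : Prop := out = convert_fields_alt args
instance (args : List String) (out : List String) : Decidable (Spec_convert_fields args out) := by unfold Spec_convert_fields; infer_instance

-- ===== CLAIM (what is proved, stated in full; the proofs are below) =====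
def Claim_equal_convert_fields : Prop := ∀ (args : List String), Dom_convert_fields args → Pre_convert_fields args → Spec_convert_fields args (convert_fields args)

-- ===== LEMMAS AND PROOFS =====

-- The columns A appends for one key, and the whole list A produces.
def gcols (item : String) : List String :=
  if item == "network" then ["ip_address", "net_subnet"]
  else if item == "hdd" then ["hdd_number", "hdd_size"]
  else [convert_field item]

def colsOf (args : List String) : List String :=
  "host_name" :: "server_id" :: args.flatMap gcols

-- A's value is base ++ flatMap gcols.
theorem foldlA (args : List String) : ∀ acc : List String,
    args.foldl (fun result item =>
      if item == "network" then result ++ ["ip_address", "net_subnet"]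
      else if item == "hdd" then result ++ ["hdd_number", "hdd_size"]
      else result ++ [convert_field item]) acc = acc ++ args.flatMap gcols := by
  induction args with
  | nil => intro acc; simp
  | cons a rest ih =>
    intro acc
    simp only [List.foldl_cons, List.flatMap_cons, ih]
    unfold gcols
    split_ifs <;> simp

theorem A_eq (args : List String) : convert_fields args = colsOf args := by
  unfold convert_fields colsOf
  rw [foldlA]
  rfl

-- Per-key facts, checked by computation on the nine admitted keys.
theorem keyFacts (item : String)
    (h : item ∈ ["cpu", "ram", "hdd", "ip", "net_mask", "os", "network", "is_name", "dc"]) :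
    ((pvTable.get? item).getD "").toList
        = [' '].intercalate ((gcols item).map String.toList)
      ∧ gcols item ≠ []
      ∧ ∀ w ∈ gcols item, ' ' ∉ w.toList := by
  fin_cases h <;> decide

-- intercalate over a cons / an append (nonempty pieces).
theorem inter_singleton (x : Char) (a : List Char) : [x].intercalate [a] = a := by
  simp [List.intercalate]

theorem inter_cons (x : Char) (a : List Char) (bs : List (List Char)) (hb : bs ≠ []) :
    [x].intercalate (a :: bs) = a ++ x :: [x].intercalate bs := by
  cases bs with
  | nil => exact absurd rfl hb
  | cons b l => simp [List.intercalate, List.intersperse_cons₂]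

theorem inter_append (x : Char) (as bs : List (List Char)) (ha : as ≠ []) (hb : bs ≠ []) :
    [x].intercalate (as ++ bs) = [x].intercalate as ++ x :: [x].intercalate bs := by
  induction as with
  | nil => exact absurd rfl ha
  | cons a l ih =>
    cases l with
    | nil => rw [List.singleton_append, inter_cons x a bs hb, inter_singleton]
    | cons a' l' =>
      rw [List.cons_append, inter_cons x a ((a' :: l') ++ bs) (by simp),
          inter_cons x a (a' :: l') (by simp), ih (by simp)]
      simp

theorem flatMap_gcols_ne_nil (args : List String) (hne : args ≠ [])
    (hpre : Pre_convert_fields args) : args.flatMap gcols ≠ [] := by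
  cases args with
  | nil => exact absurd rfl hne
  | cons a rest =>
    have hg := (keyFacts a (hpre a (List.mem_cons_self ..))).2.1
    simp only [List.flatMap_cons]
    intro h
    exact hg (List.append_eq_nil_iff.mp h).1

-- The tail of the join equals the intercalation of the flatMapped columns.
theorem tail_eq (args : List String) (hne : args ≠ []) (hpre : Pre_convert_fields args) :
    [' '].intercalate ((args.map (fun item => (pvTable.get? item).getD "")).map String.toList)
      = [' '].intercalate ((args.flatMap gcols).map String.toList) := by
  induction args with
  | nil => exact absurd rfl hne
  | cons a rest ih =>
    have hka := keyFacts a (hpre a (List.mem_cons_self ..))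
    have hprer : Pre_convert_fields rest := fun i hi => hpre i (List.mem_cons_of_mem _ hi)
    cases rest with
    | nil =>
      simp only [List.map_cons, List.map_nil, List.flatMap_cons, List.flatMap_nil,
        List.append_nil, inter_singleton]
      exact hka.1
    | cons b rs =>
      have hrest := ih (by simp) hprer
      have hfm : (b :: rs).flatMap gcols ≠ [] := flatMap_gcols_ne_nil _ (by simp) hprer
      rw [List.map_cons, List.map_cons, inter_cons _ _ _ (by simp),
          List.flatMap_cons, List.map_append,
          inter_append _ _ _ (by simpa using hka.2.1) (by simpa using hfm),
          hka.1, hrest]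

-- The joined string's characters are the intercalation of colsOf's characters.
theorem join_eq (args : List String) (hpre : Pre_convert_fields args) :
    (PySem.Str.join " " ("host_name server_id" ::
        args.map (fun item => (pvTable.get? item).getD ""))).toList
      = [' '].intercalate ((colsOf args).map String.toList) := by
  rw [PySem.Str.toList_join]
  cases args with
  | nil => decide
  | cons a rest =>
    have h1 : (("host_name server_id" :: (a :: rest).map
        (fun item => (pvTable.get? item).getD "")).map String.toList)
        = ["host_name server_id".toList] ++
          (((a :: rest).map (fun item => (pvTable.get? item).getD "")).map String.toList) := by
      simp
    show PySem.Chars.join " ".toList _ = _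
    rw [h1]
    have hfm : (a :: rest).flatMap gcols ≠ [] := flatMap_gcols_ne_nil _ (by simp) hpre
    have h2 : (colsOf (a :: rest)).map String.toList
        = (["host_name", "server_id"].map String.toList)
          ++ (((a :: rest).flatMap gcols).map String.toList) := by
      simp [colsOf]
    show [' '].intercalate _ = _
    rw [h2, inter_append _ _ _ (by simp) (by simp) ,
        inter_append _ _ _ (by simp) (by simpa using hfm),
        tail_eq _ (by simp) hpre]
    rfl

-- ---- Python split(' ') on an intercalation of space-free pieces returns the pieces. ----

theorem splitGo_nil (f : Nat) (cur : List Char) (acc : List (List Char)) :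
    PySem.Chars.splitOn.go [' '] f [] cur acc = (cur.reverse :: acc).reverse := by
  cases f <;> simp [PySem.Chars.splitOn.go]

theorem splitGo_space (f : Nat) (l cur : List Char) (acc : List (List Char)) :
    PySem.Chars.splitOn.go [' '] (f + 1) (' ' :: l) cur acc
      = PySem.Chars.splitOn.go [' '] f l [] (cur.reverse :: acc) := by
  simp [PySem.Chars.splitOn.go]

theorem splitGo_block (p : List Char) (hp : ' ' ∉ p) : ∀ (f : Nat) (l cur : List Char)
    (acc : List (List Char)),
    PySem.Chars.splitOn.go [' '] (f + p.length) (p ++ l) cur acc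
      = PySem.Chars.splitOn.go [' '] f l (p.reverse ++ cur) acc := by
  induction p with
  | nil => intro f l cur acc; simp
  | cons c p' ih =>
    intro f l cur acc
    have hc : c ≠ ' ' := fun h => hp (by simp [h])
    have hf : f + (c :: p').length = (f + p'.length) + 1 := by simp; omega
    rw [hf]
    have hstep : PySem.Chars.splitOn.go [' '] ((f + p'.length) + 1) (c :: (p' ++ l)) cur acc
        = PySem.Chars.splitOn.go [' '] (f + p'.length) (p' ++ l) (c :: cur) acc := by
      simp [PySem.Chars.splitOn.go, List.isPrefixOf, Ne.symm hc]
    simpa [hstep] using ih (fun h => hp (List.mem_cons_of_mem _ h)) f l (c :: cur) acc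

theorem splitGo_inter : ∀ (pieces : List (List Char)), (∀ p ∈ pieces, ' ' ∉ p) →
    ∀ (fuel : Nat) (cur : List Char) (acc : List (List Char)),
    ([' '].intercalate pieces).length ≤ fuel →
    PySem.Chars.splitOn.go [' '] fuel ([' '].intercalate pieces) cur acc
      = acc.reverse ++ ((cur.reverse ++ pieces.headD []) :: pieces.tail) := by
  intro pieces
  induction pieces with
  | nil => intro _ fuel cur acc _; simp [List.intercalate, splitGo_nil]
  | cons p rest ih =>
    intro hfree fuel cur acc hf
    have hp : ' ' ∉ p := hfree p (List.mem_cons_self ..)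
    cases rest with
    | nil =>
      have hint : [' '].intercalate [p] = p := inter_singleton ..
      rw [hint] at hf ⊢
      obtain ⟨f, rfl⟩ : ∃ f, fuel = f + p.length := ⟨fuel - p.length, by omega⟩
      have := splitGo_block p hp f [] cur acc
      simp only [List.append_nil] at this
      rw [this, splitGo_nil]
      simp
    | cons q rs =>
      have hint : [' '].intercalate (p :: q :: rs) = p ++ ' ' :: [' '].intercalate (q :: rs) :=
        inter_cons ' ' p (q :: rs) (by simp)
      rw [hint] at hf ⊢
      have hlen : p.length + (1 + ([' '].intercalate (q :: rs)).length) ≤ fuel := by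
        simp at hf; omega
      obtain ⟨f, rfl⟩ : ∃ f, fuel = (f + 1) + p.length :=
        ⟨fuel - p.length - 1, by omega⟩
      rw [splitGo_block p hp (f + 1) _ cur acc, splitGo_space]
      have hfr : ∀ r ∈ q :: rs, ' ' ∉ r := fun r hr => hfree r (List.mem_cons_of_mem _ hr)
      rw [ih hfr f [] _ (by omega)]
      simp

theorem splitOn_inter (pieces : List (List Char)) (hne : pieces ≠ [])
    (hfree : ∀ p ∈ pieces, ' ' ∉ p) :
    PySem.Chars.splitOn ([' '].intercalate pieces) [' '] = pieces := by
  unfold PySem.Chars.splitOn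
  rw [splitGo_inter pieces hfree _ [] [] (by omega)]
  cases pieces with
  | nil => exact absurd rfl hne
  | cons p rest => simp

-- colsOf's entries are space-free inside Pre_.
theorem colsOf_free (args : List String) (hpre : Pre_convert_fields args) :
    ∀ w ∈ colsOf args, ' ' ∉ w.toList := by
  intro w hw
  unfold colsOf at hw
  simp only [List.mem_cons] at hw
  rcases hw with rfl | rfl | hw
  · decide
  · decide
  rcases List.mem_flatMap.mp hw with ⟨item, hitem, hwg⟩
  exact (keyFacts item (hpre item hitem)).2.2 w hwg

-- ===== VERDICT (by name: the statement is the Claim_ definition above) =====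
theorem convert_fields_spec : Claim_equal_convert_fields := by
  intro args _ hpre
  unfold Spec_convert_fields
  show convert_fields args = convert_fields_alt args
  have halt : convert_fields_alt args
      = (PySem.Str.split? (PySem.Str.join " "
          ("host_name server_id" :: args.map (fun item => (pvTable.get? item).getD ""))) " ").getD [] := rfl
  rw [halt]
  have hsplit : PySem.Str.split? (PySem.Str.join " "
      ("host_name server_id" :: args.map (fun item => (pvTable.get? item).getD ""))) " "
      = some ((PySem.Chars.splitOn (PySem.Str.join " "
          ("host_name server_id" :: args.map (fun item => (pvTable.get? item).getD ""))).toList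
          [' ']).map String.ofList) := by
    unfold PySem.Str.split? PySem.Chars.split?
    rfl
  rw [hsplit]
  simp only [Option.getD_some]
  rw [join_eq args hpre,
      splitOn_inter ((colsOf args).map String.toList) (by simp [colsOf])
        (by intro p hp
            rcases List.mem_map.mp hp with ⟨w, hw, rfl⟩
            exact colsOf_free args hpre w hw)]
  rw [A_eq]
  simp [Function.comp_def]
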